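-- pv_equiv track=rewrite | github.com/kenvenner/ecobee | vcconvert2.py | find_max_value_per_booking_code
-- ===== SOURCE A (Python) =====
-- BOOKING_FLD = 'Booking'
--
-- def find_max_value_per_booking_code(xlsaref):
--     """
--     step through the records and extract the code from alpha before "-" and then find the max value after that
--
--     :param xlsaref: (list of dict) - the records from the xls
--
--     :return max_values: (dict) - keyed by the code with value of the max value
--     """
--     max_values = dict()
--     for rec in xlsaref:
--         booking = rec.get(BOOKING_FLD)
--         if not booking:
--             # if not there or not populated skip
--             continue
--         bk_code, bk_value = booking.split('-')
--         bk_code = bk_code.upper()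
--         if bk_code not in max_values:
--             max_values[bk_code] = bk_value
--         elif bk_value > max_values[bk_code]:
--             max_values[bk_code] = bk_value
--
--     return max_values
-- ===== SOURCE B (Python) =====
-- BOOKING_FLD = 'Booking'
--
-- def find_max_value_per_booking_code(xlsaref):
--     # two-pass: collect every value per upper-cased code, then reduce each group with max()
--     groups = {}
--     for rec in xlsaref:
--         booking = rec.get(BOOKING_FLD)
--         if not booking:
--             continue
--         bk_code, bk_value = booking.split('-')
--         groups.setdefault(bk_code.upper(), []).append(bk_value)
--     return {code: max(values) for code, values in groups.items()}
-- ===== Notes on version B (the rewrite author's own statement) =====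
-- stated objective: simpler
-- what changed: B replaces A's single-pass running-max with a conditional in-place dict update by a two-pass collect-then-reduce: first group all values per upper-cased code in first-appearance order, then build the result with max() over each group.
import Mathlib
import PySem

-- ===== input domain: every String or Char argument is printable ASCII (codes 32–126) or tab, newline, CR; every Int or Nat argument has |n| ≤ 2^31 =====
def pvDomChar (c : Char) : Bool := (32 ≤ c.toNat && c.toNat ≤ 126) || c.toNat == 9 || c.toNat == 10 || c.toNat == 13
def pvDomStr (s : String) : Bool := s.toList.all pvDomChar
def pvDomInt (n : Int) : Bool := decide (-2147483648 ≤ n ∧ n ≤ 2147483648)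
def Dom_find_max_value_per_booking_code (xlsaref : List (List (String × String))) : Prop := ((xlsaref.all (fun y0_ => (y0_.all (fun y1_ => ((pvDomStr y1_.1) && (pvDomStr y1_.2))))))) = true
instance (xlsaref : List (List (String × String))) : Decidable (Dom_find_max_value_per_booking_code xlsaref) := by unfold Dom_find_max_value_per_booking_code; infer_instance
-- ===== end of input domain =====

-- B changes the decomposition only (single-pass running max → collect groups, then max() per group); equal output proved on Pre_.

-- ===== PORT A =====
-- single pass keeping the current maximum per code in a dict
def find_max_value_per_booking_code (xlsaref : List (List (String × String))) : List (String × String) :=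
  (xlsaref.foldl (fun max_values rec =>
    match (PySem.Dict.mk rec).get? "Booking" with
    | none => max_values
    | some booking =>
      if booking = "" then max_values
      else
        match PySem.Str.split? booking "-" with
        | some [bk_code0, bk_value] =>
          let bk_code := PySem.Str.upper bk_code0
          if max_values.contains bk_code = false then
            max_values.insert bk_code bk_value
          else if max_values.getD bk_code "" < bk_value then
            max_values.insert bk_code bk_value
          else max_values
        | _ => max_values)  -- split gave ≠ 2 parts: Python raises ValueError; excluded by Pre_
    PySem.Dict.empty).items

-- ===== PORT B =====
-- two passes: group the values per upper-cased code, then reduce each group with max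
-- (max(values) on the never-empty groups is PySem.List.max? …; .getD "" only totalizes the Option)
def find_max_value_per_booking_code_alt (xlsaref : List (List (String × String))) : List (String × String) :=
  let groups : PySem.Dict String (List String) :=
    xlsaref.foldl (fun groups rec =>
      match (PySem.Dict.mk rec).get? "Booking" with
      | some booking =>
        if booking = "" then groups
        else
          match PySem.Str.split? booking "-" with
          | some parts =>
            match parts with
            | [] => groups  -- <2 parts: Python raises ValueError; excluded by Pre_
            | bk_code :: tail =>
              match tail with
              | [] => groups  -- <2 parts: Python raises ValueError; excluded by Pre_
              | bk_value :: rest =>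
                if rest = [] then
                  groups.modify (PySem.Str.upper bk_code) [] (fun vs => vs ++ [bk_value])
                else groups  -- >2 parts: Python raises ValueError; excluded by Pre_
          | none => groups
      | none => groups)
      PySem.Dict.empty
  groups.items.map (fun p => (p.1, (PySem.List.max? p.2 (fun x => x)).getD ""))

-- ===== PRECONDITION & SPEC =====
-- Pre_ excludes exactly the inputs on which Python A raises ValueError: a truthy 'Booking'
-- whose split('-') does not give exactly two parts (zero or several '-').
def Pre_find_max_value_per_booking_code (xlsaref : List (List (String × String))) : Prop :=
  ∀ rec ∈ xlsaref, ∀ b : String, (PySem.Dict.mk rec).get? "Booking" = some b → b ≠ "" →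
    ((PySem.Str.split? b "-").getD []).length = 2
instance (xlsaref : List (List (String × String))) : Decidable (Pre_find_max_value_per_booking_code xlsaref) := by unfold Pre_find_max_value_per_booking_code; infer_instance
def pvWitness_find_max_value_per_booking_code : (List (List (String × String))) :=
  [[("Booking", "ab-3")], [], [("Booking", "AB-7"), ("x", "y")], [("Booking", "")]]
def Spec_find_max_value_per_booking_code (xlsaref : List (List (String × String))) (out : List (String × String)) : Prop := out = find_max_value_per_booking_code_alt xlsaref
instance (xlsaref : List (List (String × String))) (out : List (String × String)) : Decidable (Spec_find_max_value_per_booking_code xlsaref out) := by unfold Spec_find_max_value_per_booking_code; infer_instance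

-- ===== CLAIM (what is proved, stated in full; the proofs are below) =====
def Claim_equal_find_max_value_per_booking_code : Prop := ∀ (xlsaref : List (List (String × String))), Dom_find_max_value_per_booking_code xlsaref → Pre_find_max_value_per_booking_code xlsaref → Spec_find_max_value_per_booking_code xlsaref (find_max_value_per_booking_code xlsaref)

-- ===== LEMMAS AND PROOFS =====

-- A's fold body and B's fold body, named for the proofs
def pvStepA (max_values : PySem.Dict String String) (rec : List (String × String)) : PySem.Dict String String :=
  match (PySem.Dict.mk rec).get? "Booking" with
  | none => max_values
  | some booking =>
    if booking = "" then max_values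
    else
      match PySem.Str.split? booking "-" with
      | some [bk_code0, bk_value] =>
        let bk_code := PySem.Str.upper bk_code0
        if max_values.contains bk_code = false then max_values.insert bk_code bk_value
        else if max_values.getD bk_code "" < bk_value then max_values.insert bk_code bk_value
        else max_values
      | _ => max_values

def pvStepB (groups : PySem.Dict String (List String)) (rec : List (String × String)) : PySem.Dict String (List String) :=
  match (PySem.Dict.mk rec).get? "Booking" with
  | some booking =>
    if booking = "" then groups
    else
      match PySem.Str.split? booking "-" with
      | some parts =>
        match parts with
        | [] => groups
        | bk_code :: tail =>
          match tail with
          | [] => groups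
          | bk_value :: rest =>
            if rest = [] then groups.modify (PySem.Str.upper bk_code) [] (fun vs => vs ++ [bk_value])
            else groups
      | none => groups
  | none => groups

def pvMaxS (vs : List String) : String := (PySem.List.max? vs (fun x => x)).getD ""

def pvReduce (its : List (String × List String)) : List (String × String) :=
  its.map (fun p => (p.1, pvMaxS p.2))

theorem pv_lt_empty (v : String) (h : v ≠ "") : "" < v := by
  rw [String.lt_iff_toList_lt]
  cases hv : v.toList with
  | nil => exact absurd (by cases v; simp_all) h
  | cons c cs => simp [String.toList]

theorem pvMaxS_append (vs : List String) (v : String) :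
    pvMaxS (vs ++ [v]) = if pvMaxS vs < v then v else pvMaxS vs := by
  cases vs with
  | nil =>
    have h1 : pvMaxS ([] ++ [v]) = v := rfl
    have h2 : pvMaxS [] = "" := rfl
    rw [h1, h2]
    by_cases hv : v = ""
    · subst hv; simp
    · rw [if_pos (pv_lt_empty v hv)]
  | cons x t =>
    have h1 : pvMaxS ((x :: t) ++ [v]) = (t ++ [v]).foldl max x := by
      unfold pvMaxS
      rw [List.cons_append, PySem.List.max?_id_cons, Option.getD_some]
    have h2 : pvMaxS (x :: t) = t.foldl max x := by
      unfold pvMaxS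
      rw [PySem.List.max?_id_cons, Option.getD_some]
    rw [h1, h2, List.foldl_append]
    simp only [List.foldl_cons, List.foldl_nil]
    rcases lt_or_ge (t.foldl max x) v with h | h
    · rw [if_pos h, max_eq_right h.le]
    · rw [if_neg (not_lt.mpr h), max_eq_left h]

-- the key step: A's conditional running-max update on the reduced dict mirrors B's group append
theorem pv_key (d : PySem.Dict String (List String)) (hnd : d.keys.Nodup) (k v : String) :
    (if (PySem.Dict.mk (pvReduce d.items)).contains k = false then
        (PySem.Dict.mk (pvReduce d.items)).insert k v
      else if (PySem.Dict.mk (pvReduce d.items)).getD k "" < v then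
        (PySem.Dict.mk (pvReduce d.items)).insert k v
      else PySem.Dict.mk (pvReduce d.items)).items
    = pvReduce ((d.modify k [] (fun vs => vs ++ [v])).items) := by
  have hc : (PySem.Dict.mk (pvReduce d.items)).contains k = d.contains k := by
    simp only [PySem.Dict.contains, pvReduce, List.any_map]
    rfl
  rw [PySem.Dict.modify]
  by_cases h : d.contains k = true
  · -- the code is already present: A bumps the running max, B appends to its group
    cases hg : d.get? k with
    | none => rw [PySem.Dict.contains_eq_isSome_get?, hg] at h; simp at h
    | some vs =>
      have hgd : d.getD k [] = vs := by simp [PySem.Dict.getD, hg]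
      have hA : (PySem.Dict.mk (pvReduce d.items)).getD k "" = pvMaxS vs := by
        unfold PySem.Dict.getD
        unfold PySem.Dict.get? at hg ⊢
        unfold pvReduce
        rw [List.find?_map]
        cases hf : List.find? (fun p => p.1 == k) d.items with
        | none => rw [hf] at hg; simp at hg
        | some pr =>
          rw [hf] at hg
          simp only [Option.map_some] at hg
          have he : (fun p => p.1 == k) ∘ (fun p : String × List String => (p.1, pvMaxS p.2))
              = (fun p => p.1 == k) := rfl
          rw [he, hf]
          simpa using congrArg pvMaxS (Option.some.inj hg)
      rw [hc, h, hgd]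
      simp only [Bool.true_eq_false, if_false]
      rw [hA]
      have hcA : (PySem.Dict.mk (pvReduce d.items)).contains k = true := by rw [hc]; exact h
      by_cases hlt : pvMaxS vs < v
      · rw [if_pos hlt, PySem.Dict.items_insert_of_contains _ _ hcA,
           PySem.Dict.items_insert_of_contains _ _ h]
        unfold pvReduce
        simp only [List.map_map]
        apply List.map_congr_left
        intro p _
        by_cases hp : p.1 = k
        · simp [Function.comp, hp, pvMaxS_append, hlt]
        · simp [Function.comp, hp]
      · rw [if_neg hlt, PySem.Dict.items_insert_of_contains _ _ h]
        unfold pvReduce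
        simp only [List.map_map]
        symm
        apply List.map_congr_left
        intro p hp
        by_cases hpk : p.1 = k
        · -- the appended max collapses, and p is THE entry at k (keys are unique)
          have h2 : pvMaxS (vs ++ [v]) = pvMaxS vs := by rw [pvMaxS_append, if_neg hlt]
          have hpv : d.get? p.1 = some p.2 :=
            PySem.Dict.get?_of_mem_items d (by simpa using hp) hnd
          rw [hpk, hg] at hpv
          have hvs : p.2 = vs := (Option.some.inj hpv).symm
          simp [Function.comp, hpk, h2, hvs]
        · simp [Function.comp, hpk]
  · have h' : d.contains k = false := by simpa using h
    have hcA : (PySem.Dict.mk (pvReduce d.items)).contains k = false := by rw [hc]; exact h'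
    rw [if_pos hcA,
        PySem.Dict.items_insert_of_not_contains (PySem.Dict.mk (pvReduce d.items)) v hcA,
        PySem.Dict.items_insert_of_not_contains d _ h']
    rw [PySem.Dict.getD_of_not_contains d [] h']
    unfold pvReduce
    simp [pvMaxS, PySem.List.max?]

theorem pv_step (d : PySem.Dict String (List String)) (hnd : d.keys.Nodup)
    (rec : List (String × String)) :
    (pvStepA ⟨pvReduce d.items⟩ rec).items = pvReduce (pvStepB d rec).items := by
  unfold pvStepA pvStepB
  cases (PySem.Dict.mk rec).get? "Booking" with
  | none => rfl
  | some booking =>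
    dsimp only
    by_cases hb : booking = ""
    · rw [if_pos hb, if_pos hb]
    · rw [if_neg hb, if_neg hb]
      cases PySem.Str.split? booking "-" with
      | none => rfl
      | some parts =>
        rcases parts with _ | ⟨c, _ | ⟨v, rest⟩⟩
        · rfl
        · rfl
        · rcases rest with _ | ⟨w, rest⟩
          · exact pv_key d hnd (PySem.Str.upper c) v
          · simp

theorem pv_step_nodup (d : PySem.Dict String (List String)) (hnd : d.keys.Nodup)
    (rec : List (String × String)) : (pvStepB d rec).keys.Nodup := by
  unfold pvStepB
  cases (PySem.Dict.mk rec).get? "Booking" with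
  | none => exact hnd
  | some booking =>
    dsimp only
    by_cases hb : booking = ""
    · rw [if_pos hb]; exact hnd
    · rw [if_neg hb]
      cases PySem.Str.split? booking "-" with
      | none => exact hnd
      | some parts =>
        rcases parts with _ | ⟨c, _ | ⟨v, rest⟩⟩
        · exact hnd
        · exact hnd
        · rcases rest with _ | ⟨w, rest⟩
          · exact PySem.Dict.nodup_keys_insert _ _ _ hnd
          · simpa using hnd

theorem pv_main (xs : List (List (String × String))) (d : PySem.Dict String (List String))
    (hnd : d.keys.Nodup) :
    (xs.foldl pvStepA ⟨pvReduce d.items⟩).items = pvReduce (xs.foldl pvStepB d).items := by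
  induction xs generalizing d with
  | nil => rfl
  | cons rec t ih =>
    have h1 := pv_step d hnd rec
    simp only [List.foldl_cons]
    rw [PySem.Dict.ext (y := ⟨pvReduce (pvStepB d rec).items⟩) h1]
    exact ih (pvStepB d rec) (pv_step_nodup d hnd rec)

-- ===== VERDICT (by name: the statement is the Claim_ definition above) =====
theorem find_max_value_per_booking_code_spec : Claim_equal_find_max_value_per_booking_code := by
  intro xlsaref _ hpre
  show (xlsaref.foldl pvStepA ⟨pvReduce (PySem.Dict.empty : PySem.Dict String (List String)).items⟩).items
      = pvReduce (xlsaref.foldl pvStepB (PySem.Dict.empty : PySem.Dict String (List String))).items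
  exact pv_main xlsaref PySem.Dict.empty PySem.Dict.nodup_keys_empty
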